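-- pv_equiv track=rewrite | github.com/feeeper/podcast-shownotes | notebooks/segmentation.py | _depth_scores
-- ===== SOURCE A (Python) =====
-- def _depth_scores(scores):
--     """Calculates the depth of each gap, i.e. the average difference
--     between the left and right peaks and the gap's score"""
--
--     depth_scores = [0 for x in scores]
--     #clip boundaries: this holds on the rule of thumb(my thumb)
--     #that a section shouldn't be smaller than at least 2
--     #pseudosentences for small texts and around 5 for larger ones.
--     clip = min(max(int(len(scores)/10), 2), 5)
--     index = clip
--
--     for gapscore in scores[clip:-clip]:
--         lpeak = gapscore
--         for score in scores[index::-1]: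
--             if score >= lpeak:
--                 lpeak = score
--             else:
--                 break
--         rpeak = gapscore
--         for score in scores[index:]:
--             if score >= rpeak:
--                 rpeak = score
--             else:
--                 break
--         depth_scores[index] = lpeak + rpeak - 2 * gapscore
--         index += 1
--
--     return depth_scores
-- ===== SOURCE B (Python) =====
-- def _run_peaks(xs):
--     """Left-to-right pass: peak of the maximal non-increasing (leftward) run ending at each i."""
--     if not xs:
--         return []
--     peaks = [xs[0]]
--     prev = peak = xs[0]
--     for x in xs[1:]:
--         if prev < x:
--             peak = x
--         peaks.append(peak)
--         prev = x
--     return peaks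
--
--
-- def _depth_scores(scores):
--     n = len(scores)
--     clip = min(max(n // 10, 2), 5)
--     left = _run_peaks(scores)
--     right = _run_peaks(scores[::-1])[::-1]
--     return [l + r - 2 * x if clip <= i < n - clip else 0
--             for i, (x, l, r) in enumerate(zip(scores, left, right))]
-- ===== Notes on version B (the rewrite author's own statement) =====
-- stated objective: faster
-- what changed: Replaces the per-gap leftward/rightward rescans (each over a fresh slice) by two linear passes that precompute the monotone-run peak arrays left/right, then combines them in one comprehension.
import Mathlib
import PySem

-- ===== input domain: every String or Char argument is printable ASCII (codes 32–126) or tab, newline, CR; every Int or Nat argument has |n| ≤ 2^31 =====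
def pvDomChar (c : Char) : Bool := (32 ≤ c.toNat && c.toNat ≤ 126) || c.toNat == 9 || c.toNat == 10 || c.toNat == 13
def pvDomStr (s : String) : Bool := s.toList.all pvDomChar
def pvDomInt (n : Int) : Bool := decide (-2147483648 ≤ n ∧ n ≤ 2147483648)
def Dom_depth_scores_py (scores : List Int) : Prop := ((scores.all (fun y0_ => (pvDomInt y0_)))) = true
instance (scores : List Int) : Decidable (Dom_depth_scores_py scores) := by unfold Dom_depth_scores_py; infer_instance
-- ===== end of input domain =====

-- B replaces A's per-gap leftward/rightward rescans by two linear passes precomputing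
-- the monotone-run peak arrays, then one combining pass (objective: faster).

-- ===== PORT A =====
-- A's inner "for score in …: if score >= peak: peak = score else: break" loop,
-- used for both the lpeak and the rpeak scan.
def pvLscan : List Int → Int → Int
  | [], p => p
  | s :: rest, p => if s ≥ p then pvLscan rest s else p

-- the body of A's main loop; state = (depth_scores, index)
def pvBodyA (scores : List Int) (st : List Int × Int) (gapscore : Int) : List Int × Int :=
  -- scores[index::-1]: 0 ≤ index < len(scores) always holds here, where this slice
  -- is exactly (scores.take (index+1)).reverse
  let lpeak := pvLscan ((scores.take (st.2.toNat + 1)).reverse) gapscore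
  -- scores[index:]
  let rpeak := pvLscan (PySem.List.slice scores (some st.2) none) gapscore
  -- depth_scores[index] = …  (index is always in range here)
  (st.1.set st.2.toNat (lpeak + rpeak - 2 * gapscore), st.2 + 1)

def depth_scores_py (scores : List Int) : List Int :=
  let ds := scores.map (fun _ => (0 : Int))
  -- int(len(scores)/10) = len(scores) // 10 since len(scores) ≥ 0
  let clip : Int := min (max (PySem.Int.floordiv (scores.length : Int) 10) 2) 5
  ((PySem.List.slice scores (some clip) (some (-clip))).foldl (pvBodyA scores) (ds, clip)).1

-- ===== PORT B =====
-- port of Source B's _run_peaks: one forward pass carrying (prev, peak)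
def pvRunPeaks (xs : List Int) : List Int :=
  match xs with
  | [] => []
  | x0 :: rest =>
    (rest.foldl (fun (st : List Int × Int × Int) x =>
        let peak := if st.2.1 < x then x else st.2.2
        (st.1 ++ [peak], x, peak))
      ([x0], x0, x0)).1

def depth_scores_py_alt (scores : List Int) : List Int :=
  let n : Int := scores.length
  let clip : Int := min (max (PySem.Int.floordiv n 10) 2) 5
  let left := pvRunPeaks scores
  -- scores[::-1] is scores.reverse (PySem.List.slice?_none_none_neg_one)
  let right := (pvRunPeaks scores.reverse).reverse
  (PySem.List.enumerate (scores.zip (left.zip right))).map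
    (fun p => if clip ≤ p.1 ∧ p.1 < n - clip
              then p.2.2.1 + p.2.2.2 - 2 * p.2.1 else 0)

-- ===== PRECONDITION & SPEC =====
def Spec_depth_scores_py (scores : List Int) (out : List Int) : Prop := out = depth_scores_py_alt scores
instance (scores : List Int) (out : List Int) : Decidable (Spec_depth_scores_py scores out) := by unfold Spec_depth_scores_py; infer_instance

-- ===== CLAIM (what is proved, stated in full; the proofs are below) =====
def Claim_equal_depth_scores_py : Prop := ∀ (scores : List Int), Dom_depth_scores_py scores → Spec_depth_scores_py scores (depth_scores_py scores)

-- ===== LEMMAS AND PROOFS =====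

-- structural-recursion version of Source B's peak pass (proof helper)
def pvRunAux (prev peak : Int) : List Int → List Int
  | [] => []
  | x :: xs =>
    (if prev < x then x else peak) :: pvRunAux x (if prev < x then x else peak) xs

theorem pvRunPeaks_foldl (l : List Int) : ∀ (peaks : List Int) (prev peak : Int),
    (l.foldl (fun (st : List Int × Int × Int) x =>
        let peak := if st.2.1 < x then x else st.2.2
        (st.1 ++ [peak], x, peak)) (peaks, prev, peak)).1
      = peaks ++ pvRunAux prev peak l := by
  induction l with
  | nil => intro peaks prev peak; simp [pvRunAux]
  | cons x xs ih =>
    intro peaks prev peak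
    simp only [List.foldl_cons, pvRunAux]
    rw [ih]
    simp

theorem pvRunPeaks_cons (x0 : Int) (rest : List Int) :
    pvRunPeaks (x0 :: rest) = x0 :: pvRunAux x0 x0 rest := by
  simp [pvRunPeaks, pvRunPeaks_foldl]

theorem pvRunAux_length (l : List Int) : ∀ prev peak, (pvRunAux prev peak l).length = l.length := by
  induction l with
  | nil => intro _ _; rfl
  | cons x xs ih => intro prev peak; simp [pvRunAux, ih]

theorem pvRunPeaks_length (xs : List Int) : (pvRunPeaks xs).length = xs.length := by
  cases xs with
  | nil => rfl
  | cons x0 rest => rw [pvRunPeaks_cons]; simp [pvRunAux_length]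

theorem pvRunAux_rec (l : List Int) : ∀ (prev peak : Int) (j : Nat) (h : j + 1 < l.length),
    (pvRunAux prev peak l)[j + 1]?
      = (pvRunAux prev peak l)[j]?.map
          (fun pj => if l[j]'(by omega) ≥ l[j + 1]'h then pj else l[j + 1]'h) := by
  induction l with
  | nil => intro _ _ j h; simp at h
  | cons x xs ih =>
    intro prev peak j h
    cases j with
    | zero =>
      cases xs with
      | nil => simp at h
      | cons y ys =>
        simp only [pvRunAux, List.getElem?_cons_succ, List.getElem?_cons_zero,
          List.getElem_cons_succ, List.getElem_cons_zero, Option.map_some]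
        by_cases hxy : x < y
        · have : y ≥ x := le_of_lt hxy
          simp [hxy, if_neg (by omega : ¬ x ≥ y)]
        · simp [hxy, if_pos (by omega : x ≥ y)]
    | succ j =>
      simp only [pvRunAux, List.getElem?_cons_succ, List.getElem_cons_succ]
      exact ih x _ j (by simpa using h)

theorem pvRunPeaks_zero (xs : List Int) (h : 0 < xs.length) :
    (pvRunPeaks xs)[0]? = some (xs[0]'h) := by
  cases xs with
  | nil => simp at h
  | cons x0 rest => rw [pvRunPeaks_cons]; simp

theorem pvRunPeaks_succ (xs : List Int) (j : Nat) (h : j + 1 < xs.length) :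
    (pvRunPeaks xs)[j + 1]?
      = (pvRunPeaks xs)[j]?.map
          (fun pj => if xs[j]'(by omega) ≥ xs[j + 1]'h then pj else xs[j + 1]'h) := by
  cases xs with
  | nil => simp at h
  | cons x0 rest =>
    rw [pvRunPeaks_cons]
    cases j with
    | zero =>
      cases rest with
      | nil => simp at h
      | cons y ys =>
        simp only [pvRunAux, List.getElem?_cons_succ, List.getElem?_cons_zero,
          List.getElem_cons_succ, List.getElem_cons_zero, Option.map_some]
        by_cases hxy : x0 < y
        · simp [hxy, if_neg (by omega : ¬ x0 ≥ y)]
        · simp [hxy, if_pos (by omega : x0 ≥ y)]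
    | succ j =>
      simp only [List.getElem?_cons_succ, List.getElem_cons_succ]
      exact pvRunAux_rec rest x0 x0 j (by simpa using h)

-- A's leftward scan (started strictly left of j, current peak xs[j]) is B's left-peak entry
theorem pvLscan_take (xs : List Int) (j : Nat) (h : j < xs.length) :
    (pvRunPeaks xs)[j]? = some (pvLscan ((xs.take j).reverse) (xs[j]'h)) := by
  induction j with
  | zero => rw [pvRunPeaks_zero xs h]; simp [pvLscan]
  | succ j ih =>
    have hj : j < xs.length := by omega
    rw [pvRunPeaks_succ xs j h, ih hj]
    have htake : xs.take (j + 1) = xs.take j ++ [xs[j]'hj] := by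
      rw [List.take_add_one]; simp [List.getElem?_eq_getElem hj]
    rw [htake, List.reverse_append]
    simp only [List.reverse_singleton, List.singleton_append, Option.map_some]
    by_cases hge : xs[j]'hj ≥ xs[j + 1]'h
    · simp [pvLscan, hge]
    · simp [pvLscan, hge]

-- A's lpeak scan over scores[j::-1] (initial peak = scores[j]) is B's left-peak entry
theorem pvLscan_start (xs : List Int) (j : Nat) (h : j < xs.length) :
    (pvRunPeaks xs)[j]? = some (pvLscan ((xs.take (j + 1)).reverse) (xs[j]'h)) := by
  rw [pvLscan_take xs j h]
  have htake : xs.take (j + 1) = xs.take j ++ [xs[j]'h] := by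
    rw [List.take_add_one]; simp [List.getElem?_eq_getElem h]
  rw [htake, List.reverse_append]
  simp [pvLscan]

-- A's rpeak scan over scores[j:] is B's right-peak entry
theorem pvLscan_drop (xs : List Int) (j : Nat) (h : j < xs.length) :
    ((pvRunPeaks xs.reverse).reverse)[j]? = some (pvLscan (xs.drop j) (xs[j]'h)) := by
  have hlen : (pvRunPeaks xs.reverse).length = xs.length := by
    rw [pvRunPeaks_length, List.length_reverse]
  have hk : xs.length - 1 - j < xs.reverse.length := by
    rw [List.length_reverse]; omega
  rw [List.getElem?_reverse (by rw [hlen]; exact h), hlen]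
  rw [pvLscan_take xs.reverse (xs.length - 1 - j) hk]
  have hval : xs.reverse[xs.length - 1 - j]'hk = xs[j]'h := by
    rw [List.getElem_reverse]
    congr 1
    omega
  have hlist : (xs.reverse.take (xs.length - 1 - j)).reverse = xs.drop (j + 1) := by
    rw [List.take_reverse, List.reverse_reverse]
    congr 1
    omega
  rw [hval, hlist, List.drop_eq_getElem_cons h]
  simp [pvLscan]

-- length of A's main loop result
theorem loopA_length (scores : List Int) (l : List Int) : ∀ (ds : List Int) (idx : Int),
    ((l.foldl (pvBodyA scores) (ds, idx)).1).length = ds.length := by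
  induction l with
  | nil => intro ds idx; rfl
  | cons x xs ih =>
    intro ds idx
    simp only [List.foldl_cons, pvBodyA]
    rw [ih]
    simp

-- element characterization of A's main loop
theorem loopA_get (scores : List Int) (l : List Int) : ∀ (ds : List Int) (i : Nat) (j : Nat),
    i + l.length ≤ ds.length →
    ((l.foldl (pvBodyA scores) (ds, (i : Int))).1)[j]?
      = if i ≤ j ∧ j < i + l.length
        then (l[j - i]?).map (fun x =>
          pvLscan ((scores.take (j + 1)).reverse) x
            + pvLscan (PySem.List.slice scores (some (j : Int)) none) x - 2 * x)
        else ds[j]? := by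
  induction l with
  | nil =>
    intro ds i j _
    have : ¬ (i ≤ j ∧ j < i + ([] : List Int).length) := by
      simp only [List.length_nil]; omega
    rw [List.foldl_nil, if_neg this]
  | cons x xs ih =>
    intro ds i j hlen
    have hilen : i < ds.length := by simp at hlen; omega
    simp only [List.foldl_cons, pvBodyA, Int.toNat_natCast]
    have hstep : ((i : Int) + 1) = ((i + 1 : Nat) : Int) := by push_cast; ring
    rw [hstep, ih (ds.set i _) (i + 1) j (by simp at hlen ⊢; omega)]
    by_cases hji : j = i
    · subst hji
      have h1 : ¬ (j + 1 ≤ j ∧ j < j + 1 + xs.length) := by omega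
      have h2 : j ≤ j ∧ j < j + (x :: xs).length := by simp
      rw [if_neg h1, if_pos h2, List.getElem?_set_self hilen, Nat.sub_self]
      simp
    · by_cases hcase : i + 1 ≤ j ∧ j < i + 1 + xs.length
      · have h2 : i ≤ j ∧ j < i + (x :: xs).length := by simp; omega
        rw [if_pos hcase, if_pos h2]
        have hsub : j - i = (j - (i + 1)) + 1 := by omega
        rw [hsub]
        simp
      · have h2 : ¬ (i ≤ j ∧ j < i + (x :: xs).length) := by simp; omega
        rw [if_neg hcase, if_neg h2, List.getElem?_set_ne (by omega)]

-- value form of pvLscan_start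
theorem pvRunPeaks_getElem (xs : List Int) (j : Nat) (h : j < xs.length)
    (h' : j < (pvRunPeaks xs).length) :
    (pvRunPeaks xs)[j]'h' = pvLscan ((xs.take (j + 1)).reverse) (xs[j]'h) :=
  Option.some.inj ((List.getElem?_eq_getElem h').symm.trans (pvLscan_start xs j h))

-- value form of pvLscan_drop
theorem pvRunPeaksRev_getElem (xs : List Int) (j : Nat) (h : j < xs.length)
    (h' : j < ((pvRunPeaks xs.reverse).reverse).length) :
    ((pvRunPeaks xs.reverse).reverse)[j]'h' = pvLscan (xs.drop j) (xs[j]'h) :=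
  Option.some.inj ((List.getElem?_eq_getElem h').symm.trans (pvLscan_drop xs j h))

-- the common per-index value of both ports
def pvCell (scores : List Int) (c : Nat) (j : Nat) (hj : j < scores.length) : Int :=
  if (c : Int) ≤ (j : Int) ∧ (j : Int) < (scores.length : Int) - (c : Int)
  then pvLscan ((scores.take (j + 1)).reverse) (scores[j]'hj)
       + pvLscan (scores.drop j) (scores[j]'hj) - 2 * (scores[j]'hj)
  else 0

theorem A_get_gen (scores : List Int) (c : Nat) (hcpos : 0 < c) (j : Nat)
    (hj : j < scores.length) :
    (((PySem.List.slice scores (some (c : Int)) (some (-(c : Int)))).foldl (pvBodyA scores)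
        (scores.map (fun _ => (0 : Int)), (c : Int))).1)[j]?
      = some (pvCell scores c j hj) := by
  have hslice : PySem.List.slice scores (some (c : Int)) (some (-(c : Int)))
      = (scores.drop (min c scores.length)).take (scores.length - c - min c scores.length) := by
    simp [PySem.List.slice, PySem.List.clampIdx_neg_natCast _ _ hcpos]
  rw [hslice]
  by_cases hcn : c ≤ scores.length
  case neg =>
    have hsl0 : (scores.drop (min c scores.length)).take
        (scores.length - c - min c scores.length) = [] := by
      have h0 : scores.length - c - min c scores.length = 0 := by omega
      rw [h0, List.take_zero]
    rw [hsl0, List.foldl_nil]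
    unfold pvCell
    rw [if_neg (by intro hh; have := hh.1; have := hh.2; omega)]
    simp [hj]
  rw [loopA_get scores _ _ c j
    (by simp only [List.length_take, List.length_drop, List.length_map]; omega)]
  have hcondiff : (c ≤ j ∧ j < c + ((scores.drop (min c scores.length)).take
        (scores.length - c - min c scores.length)).length)
      ↔ ((c : Int) ≤ (j : Int) ∧ (j : Int) < (scores.length : Int) - (c : Int)) := by
    simp only [List.length_take, List.length_drop]; omega
  unfold pvCell
  by_cases hcnd : (c : Int) ≤ (j : Int) ∧ (j : Int) < (scores.length : Int) - (c : Int)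
  · have hcle : c ≤ j := by exact_mod_cast hcnd.1
    have hjn : j + c < scores.length := by
      have := hcnd.2; omega
    rw [if_pos (hcondiff.mpr hcnd), if_pos hcnd]
    rw [List.getElem?_take]
    rw [if_pos (by omega)]
    rw [List.getElem?_drop]
    rw [show min c scores.length + (j - c) = j by omega]
    rw [List.getElem?_eq_getElem hj, Option.map_some, PySem.List.slice_from_natCast]
  · rw [if_neg (fun hh => hcnd (hcondiff.mp hh)), if_neg hcnd]
    simp [hj]

theorem B_get_gen (scores : List Int) (c : Nat) (j : Nat) (hj : j < scores.length) :
    ((PySem.List.enumerate (scores.zip ((pvRunPeaks scores).zip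
        ((pvRunPeaks scores.reverse).reverse)))).map
      (fun p => if (c : Int) ≤ p.1 ∧ p.1 < (scores.length : Int) - (c : Int)
                then p.2.2.1 + p.2.2.2 - 2 * p.2.1 else 0))[j]?
      = some (pvCell scores c j hj) := by
  have hlen : ((PySem.List.enumerate (scores.zip ((pvRunPeaks scores).zip
      ((pvRunPeaks scores.reverse).reverse)))).map
      (fun p => if (c : Int) ≤ p.1 ∧ p.1 < (scores.length : Int) - (c : Int)
                then p.2.2.1 + p.2.2.2 - 2 * p.2.1 else 0)).length = scores.length := by
    simp [PySem.List.enumerate_eq_zipIdx_map, pvRunPeaks_length]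
  rw [List.getElem?_eq_getElem (by omega : j < _)]
  congr 1
  simp only [PySem.List.enumerate_eq_zipIdx_map, List.getElem_map, List.getElem_zipIdx,
    List.getElem_zip, zero_add]
  unfold pvCell
  by_cases hcnd : (c : Int) ≤ (j : Int) ∧ (j : Int) < (scores.length : Int) - (c : Int)
  · rw [if_pos hcnd, if_pos hcnd]
    rw [pvRunPeaks_getElem scores j hj (by rw [pvRunPeaks_length]; exact hj),
      pvRunPeaksRev_getElem scores j hj
        (by rw [List.length_reverse, pvRunPeaks_length, List.length_reverse]; exact hj)]
  · rw [if_neg hcnd, if_neg hcnd]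

-- the two ports agree everywhere
theorem depth_scores_eq (scores : List Int) :
    depth_scores_py scores = depth_scores_py_alt scores := by
  have hclip2 : (2 : Int) ≤ min (max (PySem.Int.floordiv (scores.length : Int) 10) 2) 5 :=
    le_min (le_max_right _ _) (by norm_num)
  obtain ⟨c, hc⟩ : ∃ c : Nat,
      min (max (PySem.Int.floordiv (scores.length : Int) 10) 2) 5 = (c : Int) :=
    ⟨_, (Int.toNat_of_nonneg (by omega)).symm⟩
  have hcpos : 0 < c := by omega
  have hAdef : depth_scores_py scores
      = (((PySem.List.slice scores (some (c : Int)) (some (-(c : Int))))).foldl (pvBodyA scores)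
          (scores.map (fun _ => (0 : Int)), (c : Int))).1 := by
    simp only [depth_scores_py]
    rw [hc]
  have hBdef : depth_scores_py_alt scores
      = (PySem.List.enumerate (scores.zip ((pvRunPeaks scores).zip
          ((pvRunPeaks scores.reverse).reverse)))).map
          (fun p => if (c : Int) ≤ p.1 ∧ p.1 < (scores.length : Int) - (c : Int)
                    then p.2.2.1 + p.2.2.2 - 2 * p.2.1 else 0) := by
    simp only [depth_scores_py_alt]
    rw [hc]
  apply List.ext_getElem?
  intro j
  by_cases hj : j < scores.length
  · rw [hAdef, A_get_gen scores c hcpos j hj, hBdef, B_get_gen scores c j hj]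
  · have hAlen : (depth_scores_py scores).length = scores.length := by
      rw [hAdef, loopA_length]; simp
    have hBlen : (depth_scores_py_alt scores).length = scores.length := by
      rw [hBdef]; simp [PySem.List.enumerate_eq_zipIdx_map, pvRunPeaks_length]
    rw [List.getElem?_eq_none (by omega), List.getElem?_eq_none (by omega)]

-- ===== VERDICT (by name: the statement is the Claim_ definition above) =====
theorem depth_scores_py_spec : Claim_equal_depth_scores_py := by
  intro scores _
  unfold Spec_depth_scores_py
  exact depth_scores_eq scores
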